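-- pv_equiv track=rewrite | github.com/nurnisi/algorithms-and-data-structures | other/12-google-practice.py | decreasing_subsequences
-- ===== SOURCE A (Python) =====
-- def decreasing_subsequences(A):
--     lasts = []
--     def binary(x):
--         l, r = 0, len(lasts)
--         while l < r:
--             m = (l + r) // 2
--             if lasts[m] <= x:
--                 l = m + 1
--             else:
--                 r = m
--         return l
--
--
--     for x in A:
--         i = binary(x)
--         if i == len(lasts):
--             lasts.append(x)
--         else:
--             lasts[i] = x
--     return len(lasts)
--
-- A = [1, 1, 1]
-- ===== SOURCE B (Python) =====
-- def decreasing_subsequences(A):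
--     # O(n^2) DP: length of the longest non-decreasing subsequence.
--     seen = []  # (value, dp-length ending at that value)
--     ans = 0
--     for x in A:
--         best = 0
--         for v, d in seen:
--             if v <= x and best < d:
--                 best = d
--         seen.append((x, best + 1))
--         if ans < best + 1:
--             ans = best + 1
--     return ans
-- ===== Notes on version B (the rewrite author's own statement) =====
-- stated objective: alternative
-- what changed: Replaced patience-sorting with binary search over a tails array by the quadratic dynamic program computing, for each element, the longest non-decreasing subsequence ending there.
import Mathlib
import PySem

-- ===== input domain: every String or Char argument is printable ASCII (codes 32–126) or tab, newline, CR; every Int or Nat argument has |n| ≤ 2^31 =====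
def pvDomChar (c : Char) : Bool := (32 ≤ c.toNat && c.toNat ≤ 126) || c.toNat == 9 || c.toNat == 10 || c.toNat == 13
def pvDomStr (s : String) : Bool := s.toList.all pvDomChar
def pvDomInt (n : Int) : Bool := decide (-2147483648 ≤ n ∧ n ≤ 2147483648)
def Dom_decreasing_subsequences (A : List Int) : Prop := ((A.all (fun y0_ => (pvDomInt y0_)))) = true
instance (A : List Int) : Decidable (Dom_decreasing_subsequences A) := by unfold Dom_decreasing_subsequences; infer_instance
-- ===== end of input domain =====

-- B replaces A's patience-sorting (tails array + binary search) by the quadratic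
-- dynamic program for the longest non-decreasing subsequence; alternative algorithm, not faster.

-- ===== PORT A =====
-- inner 'binary' while-loop of A, recursion on r - l
def binSearch (lasts : List Int) (x : Int) (l r : Nat) : Nat :=
  if h : l < r then
    if lasts.getD ((l + r) / 2) 0 ≤ x then binSearch lasts x ((l + r) / 2 + 1) r
    else binSearch lasts x l ((l + r) / 2)
  else l
termination_by r - l
decreasing_by all_goals omega

-- body of A's for-loop
def stepA (lasts : List Int) (x : Int) : List Int :=
  let i := binSearch lasts x 0 lasts.length
  if i = lasts.length then lasts ++ [x] else lasts.set i x

def decreasing_subsequences (A : List Int) : Int :=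
  ((A.foldl stepA []).length : Int)

-- ===== PORT B =====
-- inner loop of B: best dp value among earlier elements ≤ x
def bestB (seen : List (Int × Int)) (x : Int) : Int :=
  seen.foldl (fun b p => if p.1 ≤ x ∧ b < p.2 then p.2 else b) 0

-- body of B's for-loop; state = (seen pairs, ans)
def stepB (st : List (Int × Int) × Int) (x : Int) : List (Int × Int) × Int :=
  (st.1 ++ [(x, bestB st.1 x + 1)],
   if st.2 < bestB st.1 x + 1 then bestB st.1 x + 1 else st.2)

def decreasing_subsequences_alt (A : List Int) : Int :=
  (A.foldl stepB ([], 0)).2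

-- ===== PRECONDITION & SPEC =====
def Spec_decreasing_subsequences (A : List Int) (out : Int) : Prop := out = decreasing_subsequences_alt A
instance (A : List Int) (out : Int) : Decidable (Spec_decreasing_subsequences A out) := by unfold Spec_decreasing_subsequences; infer_instance

-- ===== CLAIM (what is proved, stated in full; the proofs are below) =====
def Claim_equal_decreasing_subsequences : Prop := ∀ (A : List Int), Dom_decreasing_subsequences A → Spec_decreasing_subsequences A (decreasing_subsequences A)

-- ===== LEMMAS AND PROOFS =====

-- index-wise sortedness of A's tails array
def SortedIdx (L : List Int) : Prop :=
  ∀ a b : Nat, a ≤ b → b < L.length → L.getD a 0 ≤ L.getD b 0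

-- invariant tying A's tails array to B's (value, dp) pairs
def InvAB (lasts : List Int) (seen : List (Int × Int)) : Prop :=
  SortedIdx lasts ∧
  (∀ k, k < lasts.length → (lasts.getD k 0, (k : Int) + 1) ∈ seen) ∧
  (∀ p ∈ seen, ∃ k, k < lasts.length ∧ p.2 = (k : Int) + 1 ∧ lasts.getD k 0 ≤ p.1)

lemma getD_snoc_lt (L : List Int) (x : Int) (k : Nat) (h : k < L.length) :
    (L ++ [x]).getD k 0 = L.getD k 0 := by
  simp [List.getD, List.getElem?_append_left h]

lemma getD_snoc_eq (L : List Int) (x : Int) : (L ++ [x]).getD L.length 0 = x := by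
  simp [List.getD]

lemma getD_set_self (L : List Int) (x : Int) (i : Nat) (h : i < L.length) :
    (L.set i x).getD i 0 = x := by
  simp [List.getD, h]

lemma getD_set_ne (L : List Int) (x : Int) (i k : Nat) (h : k ≠ i) :
    (L.set i x).getD k 0 = L.getD k 0 := by
  simp [List.getD, List.getElem?_set_ne (by omega : i ≠ k)]

lemma binSearch_spec (lasts : List Int) (x : Int) (hs : SortedIdx lasts) :
    ∀ n l r, r - l ≤ n → l ≤ r → r ≤ lasts.length →
    (∀ m, m < l → lasts.getD m 0 ≤ x) →
    (∀ m, r ≤ m → m < lasts.length → x < lasts.getD m 0) →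
    l ≤ binSearch lasts x l r ∧ binSearch lasts x l r ≤ r ∧
    (∀ m, m < binSearch lasts x l r → lasts.getD m 0 ≤ x) ∧
    (∀ m, binSearch lasts x l r ≤ m → m < lasts.length → x < lasts.getD m 0) := by
  intro n
  induction n with
  | zero =>
    intro l r hn hlr hrlen hlo hhi
    have : l = r := by omega
    rw [binSearch]
    simp [this]
    exact ⟨fun m hm => hlo m (this ▸ hm), fun m hm h2 => hhi m (this ▸ hm) h2⟩
  | succ n ih =>
    intro l r hn hlr hrlen hlo hhi
    rw [binSearch]
    by_cases h : l < r
    · rw [dif_pos h]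
      by_cases hm : lasts.getD ((l + r) / 2) 0 ≤ x
      · rw [if_pos hm]
        obtain ⟨h1, h2, h3, h4⟩ := ih ((l + r) / 2 + 1) r (by omega) (by omega) hrlen
          (fun m hm2 => le_trans (hs m ((l + r) / 2) (by omega) (by omega)) hm) hhi
        exact ⟨by omega, h2, h3, h4⟩
      · rw [if_neg hm]
        obtain ⟨h1, h2, h3, h4⟩ := ih l ((l + r) / 2) (by omega) (by omega) (by omega) hlo
          (fun m hm2 hmlen => lt_of_lt_of_le (lt_of_not_ge hm) (hs ((l + r) / 2) m hm2 hmlen))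
        exact ⟨h1, by omega, h3, h4⟩
    · rw [dif_neg h]
      have : l = r := by omega
      exact ⟨le_refl l, by omega, fun m hmm => hlo m hmm, fun m hmm h2 => hhi m (this ▸ hmm) h2⟩

lemma bestB_fold_spec (x : Int) :
    ∀ (seen : List (Int × Int)) (b0 : Int),
    b0 ≤ seen.foldl (fun b p => if p.1 ≤ x ∧ b < p.2 then p.2 else b) b0 ∧
    (∀ p ∈ seen, p.1 ≤ x → p.2 ≤ seen.foldl (fun b p => if p.1 ≤ x ∧ b < p.2 then p.2 else b) b0) ∧
    (seen.foldl (fun b p => if p.1 ≤ x ∧ b < p.2 then p.2 else b) b0 = b0 ∨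
      ∃ p ∈ seen, p.1 ≤ x ∧ seen.foldl (fun b p => if p.1 ≤ x ∧ b < p.2 then p.2 else b) b0 = p.2) := by
  intro seen
  induction seen with
  | nil => intro b0; simp
  | cons q t ih =>
    intro b0
    simp only [List.foldl_cons]
    by_cases hq : q.1 ≤ x ∧ b0 < q.2
    · rw [if_pos hq]
      obtain ⟨h1, h2, h3⟩ := ih q.2
      refine ⟨le_trans (le_of_lt hq.2) h1, ?_, ?_⟩
      · intro p hp hpx
        rcases List.mem_cons.mp hp with hp | hp
        · subst hp; exact h1
        · exact h2 p hp hpx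
      · rcases h3 with h3 | ⟨p, hp, hpx, he⟩
        · exact Or.inr ⟨q, by simp, hq.1, h3⟩
        · exact Or.inr ⟨p, List.mem_cons_of_mem _ hp, hpx, he⟩
    · rw [if_neg hq]
      obtain ⟨h1, h2, h3⟩ := ih b0
      refine ⟨h1, ?_, ?_⟩
      · intro p hp hpx
        rcases List.mem_cons.mp hp with hp | hp
        · subst hp
          push Not at hq
          exact le_trans (hq hpx) h1
        · exact h2 p hp hpx
      · rcases h3 with h3 | ⟨p, hp, hpx, he⟩
        · exact Or.inl h3
        · exact Or.inr ⟨p, List.mem_cons_of_mem _ hp, hpx, he⟩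

lemma best_eq_bin (lasts : List Int) (seen : List (Int × Int)) (x : Int)
    (hinv : InvAB lasts seen) :
    bestB seen x = (binSearch lasts x 0 lasts.length : Int) := by
  obtain ⟨hs, hmem, hbound⟩ := hinv
  obtain ⟨hlo', hle, hlo, hhi⟩ := binSearch_spec lasts x hs lasts.length 0 lasts.length
    (by omega) (by omega) (le_refl _) (by omega) (by intro m h1 h2; omega)
  set i := binSearch lasts x 0 lasts.length with hi
  obtain ⟨hb0, hub, hcase⟩ := bestB_fold_spec x seen 0
  have hbu : bestB seen x ≤ (i : Int) := by
    rcases hcase with h | ⟨p, hp, hpx, he⟩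
    · rw [bestB, h]; exact_mod_cast Nat.zero_le i
    · obtain ⟨k, hk, hpk, hkle⟩ := hbound p hp
      have hki : k < i := by
        by_contra hc
        exact absurd (le_trans hkle hpx) (not_le_of_gt (hhi k (by omega) hk))
      rw [bestB, he, hpk]
      have : (k : Int) < i := by exact_mod_cast hki
      omega
  have hbl : (i : Int) ≤ bestB seen x := by
    rcases Nat.eq_zero_or_pos i with h0 | hpos
    · rw [h0]; exact_mod_cast hb0
    · have hk : i - 1 < lasts.length := by omega
      have hx : lasts.getD (i - 1) 0 ≤ x := hlo (i - 1) (by omega)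
      have := hub _ (hmem (i - 1) hk) hx
      have hc : ((i - 1 : Nat) : Int) + 1 = (i : Int) := by
        push_cast [Nat.cast_sub (by omega : 1 ≤ i)]; ring
      rw [bestB]; omega
  omega

lemma step_inv (lasts : List Int) (seen : List (Int × Int)) (x : Int)
    (hinv : InvAB lasts seen) :
    InvAB (stepA lasts x) (stepB (seen, (lasts.length : Int)) x).1 ∧
    (stepB (seen, (lasts.length : Int)) x).2 = ((stepA lasts x).length : Int) := by
  obtain ⟨hs, hmem, hbound⟩ := hinv
  obtain ⟨hlo', hle, hlo, hhi⟩ := binSearch_spec lasts x hs lasts.length 0 lasts.length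
    (by omega) (by omega) (le_refl _) (by omega) (by intro m h1 h2; omega)
  set i := binSearch lasts x 0 lasts.length with hidef
  have hbest : bestB seen x = (i : Int) := best_eq_bin lasts seen x ⟨hs, hmem, hbound⟩
  simp only [stepA, stepB, hbest]
  by_cases hcase : i = lasts.length
  · rw [if_pos hcase]
    have hlen : (lasts ++ [x]).length = lasts.length + 1 := by simp
    refine ⟨⟨?_, ?_, ?_⟩, ?_⟩
    · intro a b hab hb
      rw [hlen] at hb
      by_cases hbl : b < lasts.length
      · rw [getD_snoc_lt _ _ _ (by omega), getD_snoc_lt _ _ _ hbl]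
        exact hs a b hab hbl
      · have hbe : b = lasts.length := by omega
        subst hbe
        rw [getD_snoc_eq]
        by_cases hae : a = lasts.length
        · subst hae; rw [getD_snoc_eq]
        · rw [getD_snoc_lt _ _ _ (by omega)]
          exact hlo a (by omega)
    · intro k hk
      rw [hlen] at hk
      by_cases hkl : k < lasts.length
      · rw [getD_snoc_lt _ _ _ hkl]
        exact List.mem_append_left _ (hmem k hkl)
      · have hke : k = lasts.length := by omega
        subst hke
        rw [getD_snoc_eq, ← hcase]
        simp
    · intro p hp
      rcases List.mem_append.mp hp with hp | hp
      · obtain ⟨k, hk, h1, h2⟩ := hbound p hp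
        exact ⟨k, by omega, h1, by rw [getD_snoc_lt _ _ _ hk]; exact h2⟩
      · simp only [List.mem_singleton] at hp
        subst hp
        refine ⟨lasts.length, by omega, by simp [hcase], ?_⟩
        rw [getD_snoc_eq]
    · have hcond : (lasts.length : Int) < (i : Int) + 1 := by
        have : i = lasts.length := hcase; omega
      rw [if_pos hcond]
      simp [hlen, hcase]
  · have hilt : i < lasts.length := by omega
    rw [if_neg hcase]
    have hlen : (lasts.set i x).length = lasts.length := by simp
    have hxlt : x < lasts.getD i 0 := hhi i (le_refl i) hilt
    refine ⟨⟨?_, ?_, ?_⟩, ?_⟩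
    · intro a b hab hb
      rw [hlen] at hb
      by_cases hae : a = i <;> by_cases hbe : b = i
      · subst hae; subst hbe; rw [getD_set_self _ _ _ hilt]
      · subst hae
        rw [getD_set_self _ _ _ hilt, getD_set_ne _ _ _ _ hbe]
        exact le_of_lt (hhi b (by omega) hb)
      · subst hbe
        rw [getD_set_self _ _ _ hilt, getD_set_ne _ _ _ _ hae]
        exact hlo a (by omega)
      · rw [getD_set_ne _ _ _ _ hae, getD_set_ne _ _ _ _ hbe]
        exact hs a b hab hb
    · intro k hk
      rw [hlen] at hk
      by_cases hke : k = i
      · subst hke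
        rw [getD_set_self _ _ _ hilt]
        simp
      · rw [getD_set_ne _ _ _ _ hke]
        exact List.mem_append_left _ (hmem k hk)
    · intro p hp
      rcases List.mem_append.mp hp with hp | hp
      · obtain ⟨k, hk, h1, h2⟩ := hbound p hp
        refine ⟨k, by simp only [List.length_set]; exact hk, h1, ?_⟩
        by_cases hke : k = i
        · subst hke
          rw [getD_set_self _ _ _ hilt]
          exact le_trans (le_of_lt hxlt) h2
        · rw [getD_set_ne _ _ _ _ hke]; exact h2
      · simp only [List.mem_singleton] at hp
        subst hp
        exact ⟨i, by simp only [List.length_set]; exact hilt, rfl, by rw [getD_set_self _ _ _ hilt]⟩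
    · have hcond : ¬ ((lasts.length : Int) < (i : Int) + 1) := by omega
      rw [if_neg hcond]
      simp

lemma fold_inv : ∀ (A : List Int) (lasts : List Int) (seen : List (Int × Int)),
    InvAB lasts seen →
    (A.foldl stepB (seen, (lasts.length : Int))).2 = ((A.foldl stepA lasts).length : Int) := by
  intro A
  induction A with
  | nil => intro lasts seen _; simp
  | cons x t ih =>
    intro lasts seen hinv
    obtain ⟨hinv', heq⟩ := step_inv lasts seen x hinv
    simp only [List.foldl_cons]
    have hst : stepB (seen, (lasts.length : Int)) x
        = ((stepB (seen, (lasts.length : Int)) x).1, ((stepA lasts x).length : Int)) := by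
      rw [← heq]
    rw [hst]
    exact ih (stepA lasts x) _ hinv'

-- ===== VERDICT (by name: the statement is the Claim_ definition above) =====
theorem decreasing_subsequences_spec : Claim_equal_decreasing_subsequences := by
  intro A _
  unfold Spec_decreasing_subsequences decreasing_subsequences decreasing_subsequences_alt
  have h0 : InvAB [] [] := ⟨by intro a b _ h; simp at h, by intro k hk; simp at hk, by intro p hp; simp at hp⟩
  have := fold_inv A [] [] h0
  simpa using this.symm
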